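-- pv_equiv track=rewrite | github.com/TommyFurgi/introduction-to-computer-science | zestaw 3/3.17.py | sys_trojkowy
-- ===== SOURCE A (Python) =====
-- def sys_trojkowy(liczba):
--     wynik=0
--     i=0
--     while liczba>0:
--         wynik= liczba%3 * 10**i+wynik
--         liczba//=3
--         i+=1
--     return wynik
-- ===== SOURCE B (Python) =====
-- def sys_trojkowy(liczba):
--     if liczba <= 0:
--         return 0
--     return sys_trojkowy(liczba // 3) * 10 + liczba % 3
-- ===== Notes on version B (the rewrite author's own statement) =====
-- stated objective: simpler
-- what changed: Replaces the iterative loop with explicit place-value bookkeeping (wynik, i, 10**i) by a direct recursion on liczba // 3 that builds the digits most-significant-first via the call stack.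
import Mathlib
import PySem

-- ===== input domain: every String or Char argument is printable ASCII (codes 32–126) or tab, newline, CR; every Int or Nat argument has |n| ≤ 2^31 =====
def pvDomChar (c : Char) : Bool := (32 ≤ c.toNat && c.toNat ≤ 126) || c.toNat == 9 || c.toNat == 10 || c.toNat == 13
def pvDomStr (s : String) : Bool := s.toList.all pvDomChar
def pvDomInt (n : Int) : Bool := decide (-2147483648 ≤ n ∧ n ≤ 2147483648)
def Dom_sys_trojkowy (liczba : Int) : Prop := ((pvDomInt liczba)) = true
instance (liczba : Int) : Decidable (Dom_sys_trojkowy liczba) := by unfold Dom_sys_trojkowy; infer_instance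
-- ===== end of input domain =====

-- B replaces A's loop (wynik/i/10**i bookkeeping) with a direct recursion on liczba // 3; objective: simpler.

-- ===== PORT A =====
-- A's while loop, with the same state (wynik, i, liczba); terminates because liczba // 3 shrinks.
def sysTrojkowyLoopA (liczba wynik i : Int) : Int :=
  if h : liczba > 0 then
    sysTrojkowyLoopA (PySem.Int.floordiv liczba 3) (PySem.Int.mod liczba 3 * 10 ^ i.toNat + wynik) (i + 1)
  else wynik
termination_by liczba.toNat
decreasing_by
  have h3 : PySem.Int.floordiv liczba 3 = liczba / 3 := PySem.Int.floordiv_eq_ediv_of_pos (by omega)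
  rw [h3]; omega

def sys_trojkowy (liczba : Int) : Int := sysTrojkowyLoopA liczba 0 0

-- ===== PORT B =====
def sys_trojkowy_alt (liczba : Int) : Int :=
  if h : liczba ≤ 0 then 0
  else sys_trojkowy_alt (PySem.Int.floordiv liczba 3) * 10 + PySem.Int.mod liczba 3
termination_by liczba.toNat
decreasing_by
  have h3 : PySem.Int.floordiv liczba 3 = liczba / 3 := PySem.Int.floordiv_eq_ediv_of_pos (by omega)
  rw [h3]; omega

-- ===== PRECONDITION & SPEC =====
def Spec_sys_trojkowy (liczba : Int) (out : Int) : Prop := out = sys_trojkowy_alt liczba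
instance (liczba : Int) (out : Int) : Decidable (Spec_sys_trojkowy liczba out) := by unfold Spec_sys_trojkowy; infer_instance

-- ===== CLAIM (what is proved, stated in full; the proofs are below) =====
def Claim_equal_sys_trojkowy : Prop := ∀ (liczba : Int), Dom_sys_trojkowy liczba → Spec_sys_trojkowy liczba (sys_trojkowy liczba)

-- ===== LEMMAS AND PROOFS =====

-- Loop invariant: A's loop computes B's value scaled into place i, plus the accumulator.
theorem sysTrojkowyLoopA_eq (n : Nat) : ∀ (liczba wynik i : Int), liczba.toNat ≤ n → 0 ≤ i →
    sysTrojkowyLoopA liczba wynik i = sys_trojkowy_alt liczba * 10 ^ i.toNat + wynik := by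
  induction n with
  | zero =>
    intro liczba wynik i hle _
    have hnp : ¬ liczba > 0 := by omega
    rw [sysTrojkowyLoopA, sys_trojkowy_alt]
    simp [hnp, (by omega : liczba ≤ 0)]
  | succ n ih =>
    intro liczba wynik i hle hi
    by_cases h : liczba > 0
    · have h3 : PySem.Int.floordiv liczba 3 = liczba / 3 := PySem.Int.floordiv_eq_ediv_of_pos (by omega)
      rw [sysTrojkowyLoopA]
      simp only [h, dif_pos]
      rw [ih (PySem.Int.floordiv liczba 3) _ (i + 1) (by rw [h3]; omega) (by omega)]
      conv_rhs => rw [sys_trojkowy_alt]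
      rw [dif_neg (by omega : ¬ liczba ≤ 0)]
      have hpow : (i + 1).toNat = i.toNat + 1 := by omega
      rw [hpow, pow_succ]
      ring
    · rw [sysTrojkowyLoopA, sys_trojkowy_alt]
      simp [h, (by omega : liczba ≤ 0)]

-- ===== VERDICT (by name: the statement is the Claim_ definition above) =====
theorem sys_trojkowy_spec : Claim_equal_sys_trojkowy := by
  intro liczba _
  unfold Spec_sys_trojkowy sys_trojkowy
  rw [sysTrojkowyLoopA_eq liczba.toNat liczba 0 0 le_rfl le_rfl]
  simp
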